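-- pv_equiv track=rewrite | github.com/flext-sh/flext-web | scripts/documentation/workspace_run.py | extract_reason
-- ===== SOURCE A (Python) =====
-- def extract_reason(log_text: str) -> str:
--     """Extract one-line failure reason from command logs."""
--     lines = [line.strip() for line in log_text.splitlines() if line.strip()]
--     for line in lines:
--         if line.startswith("Error:"):
--             return line.replace(" ", "_")
--     if lines:
--         return lines[-1].replace(" ", "_")
--     return "docs-run-failed"
-- ===== SOURCE B (Python) =====
-- def extract_reason(log_text: str) -> str:
--     """Extract one-line failure reason from command logs (backward scan)."""
--     err = None
--     last = None
--     for raw in reversed(log_text.splitlines()):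
--         line = raw.strip()
--         if line:
--             if line.startswith("Error:"):
--                 err = line          # keep overwriting: final value = frontmost Error line
--             if last is None:
--                 last = line         # set once: first nonempty seen backwards = last nonempty
--     if err is not None:
--         return err.replace(" ", "_")
--     if last is not None:
--         return last.replace(" ", "_")
--     return "docs-run-failed"
-- ===== Notes on version B (the rewrite author's own statement) =====
-- stated objective: alternative
-- what changed: B traverses the lines BACK-TO-FRONT in one full pass with no early exit, maintaining an overwrite accumulator (last Error seen in reverse = frontmost Error) and a set-once accumulator (first nonempty seen in reverse = last nonempty line), instead of A's forward list-building, first-match scan and [-1] indexing.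
import Mathlib
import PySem

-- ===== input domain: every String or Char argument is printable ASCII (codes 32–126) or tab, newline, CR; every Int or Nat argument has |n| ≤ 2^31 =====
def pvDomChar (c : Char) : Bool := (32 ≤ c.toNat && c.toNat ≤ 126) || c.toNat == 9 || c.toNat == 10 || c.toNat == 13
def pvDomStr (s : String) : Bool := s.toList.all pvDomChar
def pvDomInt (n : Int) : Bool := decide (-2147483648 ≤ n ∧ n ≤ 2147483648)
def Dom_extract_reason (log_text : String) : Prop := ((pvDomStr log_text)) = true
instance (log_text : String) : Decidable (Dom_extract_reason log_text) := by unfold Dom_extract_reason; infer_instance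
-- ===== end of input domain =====

-- B replaces A's forward three-stage computation by one full backward pass with two accumulators (objective: alternative).

-- ===== PORT A =====
def extract_reason (log_text : String) : String :=
  let lines := ((PySem.Str.splitlines log_text).filter
      (fun line => PySem.Str.strip line ≠ "")).map PySem.Str.strip
  match lines.find? (fun line => PySem.Str.startswith line "Error:") with
  | some line => PySem.Str.replace line " " "_"
  | none =>
    match lines.getLast? with              -- 'if lines: return lines[-1]...'
    | some line => PySem.Str.replace line " " "_"
    | none => "docs-run-failed"

-- ===== PORT B =====
/-- one step of B's backward `for` loop: state = (err, last). -/
def revStep (st : Option String × Option String) (raw : String) :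
    Option String × Option String :=
  let line := PySem.Str.strip raw
  if line ≠ "" then
    ((if PySem.Str.startswith line "Error:" then some line else st.1),
     (match st.2 with | none => some line | some l => some l))
  else st

def extract_reason_alt (log_text : String) : String :=
  match (PySem.Str.splitlines log_text).reverse.foldl revStep (none, none) with
  | (some err, _) => PySem.Str.replace err " " "_"
  | (none, some last) => PySem.Str.replace last " " "_"
  | (none, none) => "docs-run-failed"

-- ===== PRECONDITION & SPEC =====
def Spec_extract_reason (log_text : String) (out : String) : Prop := out = extract_reason_alt log_text
instance (log_text : String) (out : String) : Decidable (Spec_extract_reason log_text out) := by unfold Spec_extract_reason; infer_instance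

-- ===== CLAIM (what is proved, stated in full; the proofs are below) =====
def Claim_equal_extract_reason : Prop := ∀ (log_text : String), Dom_extract_reason log_text → Spec_extract_reason log_text (extract_reason log_text)

-- ===== LEMMAS AND PROOFS =====

/-- The backward fold computes (frontmost Error line, last nonempty line) of the
    stripped, nonempty-filtered line list. -/
theorem foldr_revStep_char (ls : List String) :
    ls.foldr (fun raw st => revStep st raw) (none, none)
      = (((ls.filter (fun l => PySem.Str.strip l ≠ "")).map PySem.Str.strip).find?
           (fun line => PySem.Str.startswith line "Error:"),
         ((ls.filter (fun l => PySem.Str.strip l ≠ "")).map PySem.Str.strip).getLast?) := by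
  induction ls with
  | nil => rfl
  | cons raw rest ih =>
    rw [List.foldr_cons, ih, List.filter_cons]
    by_cases h0 : PySem.Str.strip raw = ""
    · rw [if_neg (by simp [h0])]
      simp [revStep, h0]
    · rw [if_pos (by simp [h0]), List.map_cons]
      unfold revStep
      rw [if_pos (by simpa using h0)]
      set R := (rest.filter (fun l => PySem.Str.strip l ≠ "")).map PySem.Str.strip with hR
      simp only [List.find?_cons]
      rw [Prod.mk.injEq]
      constructor
      · cases hE : PySem.Str.startswith (PySem.Str.strip raw) "Error:" with
        | false => rfl
        | true => rfl
      · cases hRc : R with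
        | nil => rfl
        | cons x xs =>
          rw [List.getLast?_cons_cons]
          cases hg : (x :: xs).getLast? with
          | none => simp at hg
          | some l => rfl

-- ===== VERDICT (by name: the statement is the Claim_ definition above) =====
theorem extract_reason_spec : Claim_equal_extract_reason := by
  intro log_text _
  unfold Spec_extract_reason extract_reason_alt extract_reason
  rw [List.foldl_reverse, foldr_revStep_char]
  set L := (((PySem.Str.splitlines log_text).filter
      (fun l => PySem.Str.strip l ≠ "")).map PySem.Str.strip)
  cases hF : L.find? (fun line => PySem.Str.startswith line "Error:") with
  | some e => simp only [hF]
  | none =>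
    cases hL : L.getLast? with
    | some l => simp only [hF, hL]
    | none => simp only [hF, hL]
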